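-- pv_equiv track=rewrite | github.com/neilneil2000/Advent-of-Code-2021 | Day3/DayThree.py | calculate_power_parameters
-- ===== SOURCE A (Python) =====
-- def ones_vs_zeroes(data,bit):
--     """
--     Compares number of ones and zeroes in a given bit position
--     Returns 1 if there are an equal number of 0 and 1 otherwise returns whichever there are more of
--     """
--     ones = 0
--     for item in data:
--             if item[bit] == '1' or item[bit] == 1:
--                 ones += 1
--     if ones >= len(data) / 2:
--         return 1
--     else:
--         return 0
--
-- def calculate_power_parameters(data):
--     gamma = []
--     epsilon = []
--     value_length = len(data[0])
--     for bit in range(0,value_length):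
--         value = ones_vs_zeroes(data,bit)
--         gamma.append(value)
--         if value == 0:
--             epsilon.append(1)
--         else:
--             epsilon.append(0)
--     gamma = binary_list_to_decimal(gamma)
--     epsilon = binary_list_to_decimal(epsilon)
--     return gamma, epsilon
--
-- def binary_list_to_decimal(binary_list):
--     decimal = 0
--     number_of_bits = len(binary_list)
--     place_value = 2**(number_of_bits-1)
--     for bit in binary_list:
--         decimal += int(bit) * place_value
--         place_value = int (place_value / 2)
--     return decimal
-- ===== SOURCE B (Python) =====
-- def calculate_power_parameters(data):
--     width = len(data[0])
--     counts = [0] * width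
--     for item in data:
--         for i in range(width):
--             if item[i] == '1':
--                 counts[i] += 1
--     n = len(data)
--     gamma = 0
--     for c in counts:
--         gamma = 2 * gamma + (1 if 2 * c >= n else 0)
--     return gamma, (1 << width) - 1 - gamma
-- ===== Notes on version B (the rewrite author's own statement) =====
-- stated objective: alternative
-- what changed: B replaces A's per-bit-position scan (one full pass over data for each column, building gamma and epsilon bit lists and converting each with a halving place-value loop) by a single pass over data maintaining per-column one-counts, then folds gamma MSB-first as gamma=2*gamma+bit and gets epsilon as the width-wide complement (2^width-1-gamma) instead of a second list and conversion.
import Mathlib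
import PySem

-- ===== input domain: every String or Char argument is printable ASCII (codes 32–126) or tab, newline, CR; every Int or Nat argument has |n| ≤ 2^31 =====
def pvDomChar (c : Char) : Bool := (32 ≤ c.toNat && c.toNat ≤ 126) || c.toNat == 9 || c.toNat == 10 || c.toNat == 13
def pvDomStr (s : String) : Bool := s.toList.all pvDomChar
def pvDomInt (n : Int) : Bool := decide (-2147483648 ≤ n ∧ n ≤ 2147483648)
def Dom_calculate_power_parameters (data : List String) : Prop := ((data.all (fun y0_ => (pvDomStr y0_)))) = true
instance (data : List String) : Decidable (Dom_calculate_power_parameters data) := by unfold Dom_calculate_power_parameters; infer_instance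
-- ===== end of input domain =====

-- B replaces A's per-bit-position rescan of the data and its two bit-list-to-decimal conversions by a
-- single pass maintaining per-column one-counts, an MSB-first gamma fold, and epsilon as the width-wide
-- complement of gamma; objective: alternative (same asymptotic cost, different algorithm).

-- ===== PORT A =====
-- 'item[bit] == 1' can never hold (item is a str, its elements are one-char strings), so only the
-- '== "1"' test is kept; 'ones >= len(data)/2' (float) is exact as 2*ones >= len(data).
-- item[bit] raises IndexError when out of range (excluded by Pre_); pyGet? returns none there.
def ones_vs_zeroes (data : List String) (bit : Int) : Int :=
  let ones : Int := data.foldl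
    (fun ones item => if PySem.Str.pyGet? item bit = some '1' then ones + 1 else ones) 0
  if 2 * ones ≥ (data.length : Int) then 1 else 0

-- place_value = 2**(n-1) halved each step: int(place_value/2) is the exact floor of a power of two as
-- long as 2**(n-1) stays in float range (Pre_ keeps the width ≤ 1024; beyond, Python raises OverflowError);
-- ported as floor division.  (For the empty list Python's 2**(-1) is the float 0.5 but the loop never reads it.)
def binary_list_to_decimal (l : List Int) : Int :=
  (l.foldl (fun (st : Int × Int) bit => (st.1 + bit * st.2, PySem.Int.floordiv st.2 2))
    ((0 : Int), 2 ^ (l.length - 1))).1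

def calculate_power_parameters (data : List String) : Int × Int :=
  let value_length := PySem.Str.len (data.headD "")  -- len(data[0]); IndexError on [] (excluded by Pre_)
  let ge := (PySem.List.pyRange 0 value_length 1).foldl
    (fun (st : List Int × List Int) bit =>
      let value := ones_vs_zeroes data bit
      (st.1 ++ [value], st.2 ++ [if value = 0 then (1 : Int) else 0])) ([], [])
  (binary_list_to_decimal ge.1, binary_list_to_decimal ge.2)

-- ===== PORT B =====
def calculate_power_parameters_alt (data : List String) : Int × Int :=
  let width := (PySem.Str.len (data.headD "")).toNat  -- len(data[0]) (≥ 0; Nat for [0]*width / range(width))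
  let counts : List Int := data.foldl
    (fun counts item => counts.zipIdx.map
      (fun p => if PySem.Str.pyGet? item (p.2 : Int) = some '1' then p.1 + 1 else p.1))
    (List.replicate width 0)
  let n : Int := data.length
  let gamma := counts.foldl (fun g c => 2 * g + if 2 * c ≥ n then (1 : Int) else 0) 0
  (gamma, ((1 : Int) <<< width) - 1 - gamma)

-- ===== PRECONDITION & SPEC =====
-- Pre_ excludes exactly the inputs where Python A raises: empty data (IndexError on data[0]), a string
-- shorter than the first one (IndexError on item[bit]), and a first string longer than 1024 characters
-- (OverflowError converting 2**(value_length-1) to float in int(place_value/2)).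
def Pre_calculate_power_parameters (data : List String) : Prop :=
  data ≠ [] ∧
  (∀ s ∈ data, PySem.Str.len (data.headD "") ≤ PySem.Str.len s) ∧
  PySem.Str.len (data.headD "") ≤ 1024
instance (data : List String) : Decidable (Pre_calculate_power_parameters data) := by
  unfold Pre_calculate_power_parameters; infer_instance

def pvWitness_calculate_power_parameters : List String := ["01", "11"]

def Spec_calculate_power_parameters (data : List String) (out : Int × Int) : Prop := out = calculate_power_parameters_alt data
instance (data : List String) (out : Int × Int) : Decidable (Spec_calculate_power_parameters data out) := by unfold Spec_calculate_power_parameters; infer_instance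

-- ===== CLAIM (what is proved, stated in full; the proofs are below) =====
def Claim_equal_calculate_power_parameters : Prop := ∀ (data : List String), Dom_calculate_power_parameters data → Pre_calculate_power_parameters data → Spec_calculate_power_parameters data (calculate_power_parameters data)

-- ===== LEMMAS AND PROOFS =====

-- the count of '1's in column i, started from accumulator o (the loop body of ones_vs_zeroes)
def pvOnesFrom (data : List String) (i : Int) (o : Int) : Int :=
  data.foldl (fun o item => if PySem.Str.pyGet? item i = some '1' then o + 1 else o) o

lemma pvOnes_eq (data : List String) (bit : Int) :
    ones_vs_zeroes data bit =
      if 2 * pvOnesFrom data bit 0 ≥ (data.length : Int) then 1 else 0 := rfl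

-- B's counting pass, characterised per column
lemma pvCounts_eq (data : List String) : ∀ (cs : List Int),
    data.foldl (fun counts item => counts.zipIdx.map
        (fun p => if PySem.Str.pyGet? item (p.2 : Int) = some '1' then p.1 + 1 else p.1)) cs
      = (List.range cs.length).map (fun (i : Nat) => pvOnesFrom data (i : Int) (cs.getD i 0)) := by
  induction data with
  | nil =>
    intro cs
    refine List.ext_getElem (by simp) ?_
    intro i h1 h2
    simp only [List.getElem_map, List.getElem_range]
    simp [pvOnesFrom, List.getD_eq_getElem?_getD, List.getElem?_eq_getElem (by simpa using h2)]
  | cons item rest ih =>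
    intro cs
    simp only [List.foldl_cons]
    rw [ih]
    refine List.ext_getElem (by simp) ?_
    intro i h1 h2
    have hlen : i < cs.length := by simpa using h1
    simp only [List.getElem_map, List.getElem_range]
    have hget : ∀ (l : List Int) (j : Nat) (hj : j < l.length), l.getD j 0 = l[j] := by
      intro l j hj; simp [List.getD_eq_getElem?_getD, List.getElem?_eq_getElem hj]
    rw [hget _ _ (by simpa using hlen), hget cs i hlen]
    simp only [List.getElem_map, List.getElem_zipIdx, Nat.zero_add]
    show pvOnesFrom rest _ _ = pvOnesFrom (item :: rest) _ _
    simp [pvOnesFrom]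

-- the MSB-first fold, restarted from an arbitrary accumulator
lemma pvFold2_acc (t : List Int) : ∀ (a : Int),
    t.foldl (fun g b => 2 * g + b) a = a * 2 ^ t.length + t.foldl (fun g b => 2 * g + b) 0 := by
  induction t with
  | nil => intro a; simp
  | cons b t ih =>
    intro a
    simp only [List.foldl_cons, List.length_cons]
    rw [ih (2 * a + b), ih (2 * 0 + b)]
    ring

lemma pvBtd_aux : ∀ (l : List Int) (d : Int),
    (l.foldl (fun (st : Int × Int) bit => (st.1 + bit * st.2, PySem.Int.floordiv st.2 2))
      (d, 2 ^ (l.length - 1))).1 = d + l.foldl (fun g b => 2 * g + b) 0 := by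
  intro l
  induction l with
  | nil => intro d; simp
  | cons b t ih =>
    intro d
    rcases t with _ | ⟨x, t'⟩
    · simp
    · have hfd : PySem.Int.floordiv ((2:Int) ^ (x :: t').length) 2 = 2 ^ ((x :: t').length - 1) := by
        have h2 : (2:Int) ^ (x :: t').length = 2 * 2 ^ ((x :: t').length - 1) := by
          rw [← pow_succ']
          norm_num
        rw [PySem.Int.floordiv_eq_ediv_of_pos (by norm_num), h2,
          Int.mul_ediv_cancel_left _ (by norm_num)]
      have key : (b :: x :: t').foldl
            (fun (st : Int × Int) bit => (st.1 + bit * st.2, PySem.Int.floordiv st.2 2))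
            (d, 2 ^ ((b :: x :: t').length - 1))
          = (x :: t').foldl
            (fun (st : Int × Int) bit => (st.1 + bit * st.2, PySem.Int.floordiv st.2 2))
            (d + b * 2 ^ (x :: t').length, 2 ^ ((x :: t').length - 1)) := by
        rw [show ((b :: x :: t').length - 1 = (x :: t').length) from rfl]
        simp only [List.foldl_cons]
        rw [hfd]
      rw [key, ih (d + b * 2 ^ (x :: t').length)]
      have hr : ((b :: x :: t').foldl (fun g b => 2 * g + b) 0)
          = (x :: t').foldl (fun g b => 2 * g + b) b := by
        simp only [List.foldl_cons]
        norm_num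
      rw [hr, pvFold2_acc (x :: t') b]
      ring

-- binary_list_to_decimal is the MSB-first fold
lemma pvBtd_eq (l : List Int) :
    binary_list_to_decimal l = l.foldl (fun g b => 2 * g + b) 0 := by
  simpa [binary_list_to_decimal] using pvBtd_aux l 0

-- complement: converting the flipped bit list
lemma pvFold2_compl (l : List Int) :
    (l.map (fun b => 1 - b)).foldl (fun g b => 2 * g + b) 0
      = 2 ^ l.length - 1 - l.foldl (fun g b => 2 * g + b) 0 := by
  induction l with
  | nil => simp
  | cons b t ih =>
    simp only [List.map_cons, List.foldl_cons, List.length_cons]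
    rw [pvFold2_acc (t.map (fun b => 1 - b)) (2 * 0 + (1 - b)), pvFold2_acc t (2 * 0 + b), ih]
    simp only [List.length_map]
    ring

-- ===== VERDICT (by name: the statement is the Claim_ definition above) =====
theorem calculate_power_parameters_spec : Claim_equal_calculate_power_parameters := by
  intro data _ _
  unfold Spec_calculate_power_parameters
  simp only [calculate_power_parameters, calculate_power_parameters_alt]
  rw [PySem.List.foldl_prod_mk
      (f := fun acc e => acc ++ [ones_vs_zeroes data e])
      (g := fun acc e => acc ++ [if ones_vs_zeroes data e = 0 then (1 : Int) else 0]),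
    PySem.List.foldl_append_singleton_eq_map, PySem.List.foldl_append_singleton_eq_map]
  simp only [List.nil_append]
  rw [pvCounts_eq data (List.replicate (PySem.Str.len (data.headD "")).toNat 0)]
  rw [pvBtd_eq, pvBtd_eq]
  set m := PySem.Str.len (data.headD "") with hm
  set R := PySem.List.pyRange 0 m 1 with hR
  set n : Int := (data.length : Int) with hn
  have hRr : R = (List.range m.toNat).map (fun k : Nat => ((k : Int))) := by
    rw [hR, PySem.List.pyRange_one]
    simp
  have hfe : ∀ b : Int, (if ones_vs_zeroes data b = 0 then (1 : Int) else 0)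
      = 1 - ones_vs_zeroes data b := by
    intro b
    rw [pvOnes_eq]
    split_ifs <;> omega
  -- epsilon list as complement of gamma list
  have hel : (R.map (fun b => if ones_vs_zeroes data b = 0 then (1 : Int) else 0))
      = (R.map (fun b => ones_vs_zeroes data b)).map (fun b => 1 - b) := by
    rw [List.map_map]
    exact List.map_congr_left (fun b _ => hfe b)
  rw [hel, pvFold2_compl]
  -- lengths
  have hlen : (R.map (fun b => ones_vs_zeroes data b)).length = m.toNat := by
    simp [hR, PySem.List.length_pyRange_one]
  rw [hlen]
  -- gamma equality
  have hg : (R.map (fun b => ones_vs_zeroes data b)).foldl (fun g b => 2 * g + b) 0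
      = (List.foldl (fun g c => 2 * g + if 2 * c ≥ n then (1 : Int) else 0) 0
          ((List.range (List.replicate m.toNat (0 : Int)).length).map
            (fun (i : Nat) => pvOnesFrom data (i : Int) ((List.replicate m.toNat (0 : Int)).getD i 0)))) := by
    rw [List.length_replicate, hRr, List.map_map, List.foldl_map, List.foldl_map]
    apply PySem.List.foldl_congr_mem
    intro acc k hk
    have hk' : k < m.toNat := List.mem_range.mp hk
    simp only [Function.comp, pvOnes_eq, List.getD_replicate _ hk']
    rfl
  rw [hg, Int.shiftLeft_eq]
  norm_num
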